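-- pv_equiv track=rewrite | github.com/mhycheung/jaxqualin | QuasinormalMode.py | quadratic_modes_matching_m
-- ===== SOURCE A (Python) =====
-- def quadratic_modes_matching_m(m, relevant_lm_list_unsorted, quadratic_n_max=1, retro = False):
--     if retro:
--         retrofac = -1
--     else:
--         retrofac = 1
--     relevant_lm_list = sorted(relevant_lm_list_unsorted)
--     quad_mode_list = []
--     relevant_length = len(relevant_lm_list)
--     for i in range(relevant_length):
--         l1, m1 = relevant_lm_list[i]
--         for j in range(i + 1):
--             l2, m2 = relevant_lm_list[j]
--             for n1 in range(quadratic_n_max + 1):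
--                 if i == j:
--                     quadratic_n_max2 = n1
--                 else:
--                     quadratic_n_max2 = quadratic_n_max
--                 for n2 in range(quadratic_n_max2 + 1):
--                     if m1 + m2 == m:
--                         lmnx = sorted([[retrofac*l2, m2, n2], [retrofac*l1, m1, n1]])
--                         quad_mode_list.append(lmnx)
--     return quad_mode_list
-- ===== SOURCE B (Python) =====
-- def quadratic_modes_matching_m(m, relevant_lm_list_unsorted, quadratic_n_max=1, retro=False):
--     retrofac = -1 if retro else 1
--     lm = sorted(relevant_lm_list_unsorted)
--     index_by_m = {}
--     out = []
--     for i, (l1, m1) in enumerate(lm):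
--         # earlier partners j < i with m1 + m2 == m, found by lookup instead of a scan
--         for j in index_by_m.get(m - m1, []):
--             l2, m2 = lm[j]
--             for n1 in range(quadratic_n_max + 1):
--                 for n2 in range(quadratic_n_max + 1):
--                     out.append(sorted([[retrofac * l2, m2, n2], [retrofac * l1, m1, n1]]))
--         # the mode paired with itself: triangular n2 <= n1, already in sorted order
--         if 2 * m1 == m:
--             for n1 in range(quadratic_n_max + 1):
--                 for n2 in range(n1 + 1):
--                     out.append([[retrofac * l1, m1, n2], [retrofac * l1, m1, n1]])
--         index_by_m.setdefault(m1, []).append(i)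
--     return out
-- ===== Notes on version B (the rewrite author's own statement) =====
-- stated objective: faster
-- what changed: B hoists the m1+m2==m test out of the two overtone loops and replaces A's inner scan over all j<=i by a lookup in a dict mapping each m-value to the ascending indices seen so far, handling the i==j triangular case as a separate branch with the pair emitted directly in sorted order.
import Mathlib
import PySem

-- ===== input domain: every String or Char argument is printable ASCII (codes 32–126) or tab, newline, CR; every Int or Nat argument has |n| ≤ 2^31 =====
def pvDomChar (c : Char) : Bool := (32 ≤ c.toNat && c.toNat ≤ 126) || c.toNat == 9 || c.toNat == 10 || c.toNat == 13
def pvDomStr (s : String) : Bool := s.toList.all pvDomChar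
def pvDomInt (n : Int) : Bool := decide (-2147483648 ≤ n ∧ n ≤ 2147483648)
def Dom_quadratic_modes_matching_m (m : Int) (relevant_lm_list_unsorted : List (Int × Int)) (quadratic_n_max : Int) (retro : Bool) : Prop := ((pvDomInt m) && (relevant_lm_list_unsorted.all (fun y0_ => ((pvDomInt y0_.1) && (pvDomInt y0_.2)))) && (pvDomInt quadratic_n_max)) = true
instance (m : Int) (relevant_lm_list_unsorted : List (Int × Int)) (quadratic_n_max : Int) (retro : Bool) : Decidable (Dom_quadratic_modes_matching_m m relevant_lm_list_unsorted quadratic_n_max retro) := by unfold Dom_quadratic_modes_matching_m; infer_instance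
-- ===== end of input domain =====

-- B replaces A's quadratic scan over all earlier modes (with the m1+m2==m test in the innermost
-- overtone loop) by a dict index from m-values to earlier indices, for an asymptotic speedup.

-- ===== PORT A =====
def quadratic_modes_matching_m (m : Int) (relevant_lm_list_unsorted : List (Int × Int)) (quadratic_n_max : Int) (retro : Bool) : List (List (List Int)) :=
  let retrofac : Int := if retro then -1 else 1
  let relevant_lm_list := PySem.List.sorted2 relevant_lm_list_unsorted (fun x => x.1) (fun x => x.2) false
  let relevant_length := PySem.List.len relevant_lm_list
  (PySem.List.pyRange 0 relevant_length 1).foldl (fun acc i =>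
    let p1 := PySem.List.pyGetD relevant_lm_list i ((0 : Int), (0 : Int))
    (PySem.List.pyRange 0 (i + 1) 1).foldl (fun acc j =>
      let p2 := PySem.List.pyGetD relevant_lm_list j ((0 : Int), (0 : Int))
      (PySem.List.pyRange 0 (quadratic_n_max + 1) 1).foldl (fun acc n1 =>
        let quadratic_n_max2 := if i = j then n1 else quadratic_n_max
        (PySem.List.pyRange 0 (quadratic_n_max2 + 1) 1).foldl (fun acc n2 =>
          if p1.2 + p2.2 = m then
            acc ++ [PySem.List.sorted [[retrofac * p2.1, p2.2, n2], [retrofac * p1.1, p1.2, n1]] (fun x => x) false]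
          else acc) acc) acc) acc) []

-- ===== PORT B =====
def quadratic_modes_matching_m_alt (m : Int) (relevant_lm_list_unsorted : List (Int × Int)) (quadratic_n_max : Int) (retro : Bool) : List (List (List Int)) :=
  let retrofac : Int := if retro then -1 else 1
  let lm := PySem.List.sorted2 relevant_lm_list_unsorted (fun x => x.1) (fun x => x.2) false
  ((PySem.List.enumerate lm).foldl (fun (st : PySem.Dict Int (List Int) × List (List (List Int))) p =>
    let i := p.1
    let l1 := p.2.1
    let m1 := p.2.2
    -- earlier partners j < i with m1 + m2 == m, found by lookup instead of a scan
    let out := (PySem.Dict.getD st.1 (m - m1) []).foldl (fun out j =>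
      let p2 := PySem.List.pyGetD lm j ((0 : Int), (0 : Int))
      (PySem.List.pyRange 0 (quadratic_n_max + 1) 1).foldl (fun out n1 =>
        (PySem.List.pyRange 0 (quadratic_n_max + 1) 1).foldl (fun out n2 =>
          out ++ [PySem.List.sorted [[retrofac * p2.1, p2.2, n2], [retrofac * l1, m1, n1]] (fun x => x) false]) out) out) st.2
    -- the mode paired with itself: triangular n2 <= n1, already in sorted order
    let out := if 2 * m1 = m then
        (PySem.List.pyRange 0 (quadratic_n_max + 1) 1).foldl (fun out n1 =>
          (PySem.List.pyRange 0 (n1 + 1) 1).foldl (fun out n2 =>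
            out ++ [[[retrofac * l1, m1, n2], [retrofac * l1, m1, n1]]]) out) out
      else out
    (PySem.Dict.insert st.1 m1 (PySem.Dict.getD st.1 m1 [] ++ [i]), out))
    (PySem.Dict.empty, [])).2

-- ===== PRECONDITION & SPEC =====
def Spec_quadratic_modes_matching_m (m : Int) (relevant_lm_list_unsorted : List (Int × Int)) (quadratic_n_max : Int) (retro : Bool) (out : List (List (List Int))) : Prop := out = quadratic_modes_matching_m_alt m relevant_lm_list_unsorted quadratic_n_max retro
instance (m : Int) (relevant_lm_list_unsorted : List (Int × Int)) (quadratic_n_max : Int) (retro : Bool) (out : List (List (List Int))) : Decidable (Spec_quadratic_modes_matching_m m relevant_lm_list_unsorted quadratic_n_max retro out) := by unfold Spec_quadratic_modes_matching_m; infer_instance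

-- ===== CLAIM (what is proved, stated in full; the proofs are below) =====
def Claim_equal_quadratic_modes_matching_m : Prop := ∀ (m : Int) (relevant_lm_list_unsorted : List (Int × Int)) (quadratic_n_max : Int) (retro : Bool), Dom_quadratic_modes_matching_m m relevant_lm_list_unsorted quadratic_n_max retro → Spec_quadratic_modes_matching_m m relevant_lm_list_unsorted quadratic_n_max retro (quadratic_modes_matching_m m relevant_lm_list_unsorted quadratic_n_max retro)

-- ===== LEMMAS AND PROOFS =====

-- one emitted pair, as A writes it
def qmEntry (rf l2 m2 n2 l1 m1 n1 : Int) : List (List Int) :=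
  PySem.List.sorted [[rf * l2, m2, n2], [rf * l1, m1, n1]] (fun x => x) false

-- all (n1, n2) pairs for a fixed off-diagonal mode pair
def qmBlockO (rf q l1 m1 l2 m2 : Int) : List (List (List Int)) :=
  (PySem.List.pyRange 0 (q + 1) 1).flatMap (fun n1 =>
    (PySem.List.pyRange 0 (q + 1) 1).map (fun n2 => qmEntry rf l2 m2 n2 l1 m1 n1))

-- all (n1, n2) pairs for the diagonal (mode paired with itself)
def qmBlockD (rf q l1 m1 : Int) : List (List (List Int)) :=
  (PySem.List.pyRange 0 (q + 1) 1).flatMap (fun n1 =>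
    (PySem.List.pyRange 0 (n1 + 1) 1).map (fun n2 => [[rf * l1, m1, n2], [rf * l1, m1, n1]]))

-- A's per-i step, verbatim from the port
def qmAstep (lm : List (Int × Int)) (rf m q : Int) : List (List (List Int)) → Int → List (List (List Int)) :=
  fun acc i =>
    let p1 := PySem.List.pyGetD lm i ((0 : Int), (0 : Int))
    (PySem.List.pyRange 0 (i + 1) 1).foldl (fun acc j =>
      let p2 := PySem.List.pyGetD lm j ((0 : Int), (0 : Int))
      (PySem.List.pyRange 0 (q + 1) 1).foldl (fun acc n1 =>
        let q2 := if i = j then n1 else q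
        (PySem.List.pyRange 0 (q2 + 1) 1).foldl (fun acc n2 =>
          if p1.2 + p2.2 = m then
            acc ++ [PySem.List.sorted [[rf * p2.1, p2.2, n2], [rf * p1.1, p1.2, n1]] (fun x => x) false]
          else acc) acc) acc) acc

-- B's per-element step, verbatim from the port
def qmBstep (lm : List (Int × Int)) (rf m q : Int) :
    PySem.Dict Int (List Int) × List (List (List Int)) → Int × (Int × Int) →
    PySem.Dict Int (List Int) × List (List (List Int)) :=
  fun st p =>
    let i := p.1
    let l1 := p.2.1
    let m1 := p.2.2
    let out := (PySem.Dict.getD st.1 (m - m1) []).foldl (fun out j =>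
      let p2 := PySem.List.pyGetD lm j ((0 : Int), (0 : Int))
      (PySem.List.pyRange 0 (q + 1) 1).foldl (fun out n1 =>
        (PySem.List.pyRange 0 (q + 1) 1).foldl (fun out n2 =>
          out ++ [PySem.List.sorted [[rf * p2.1, p2.2, n2], [rf * l1, m1, n1]] (fun x => x) false]) out) out) st.2
    let out := if 2 * m1 = m then
        (PySem.List.pyRange 0 (q + 1) 1).foldl (fun out n1 =>
          (PySem.List.pyRange 0 (n1 + 1) 1).foldl (fun out n2 =>
            out ++ [[[rf * l1, m1, n2], [rf * l1, m1, n1]]]) out) out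
      else out
    (PySem.Dict.insert st.1 m1 (PySem.Dict.getD st.1 m1 [] ++ [i]), out)

lemma qm_A_eq (m : Int) (rl : List (Int × Int)) (q : Int) (retro : Bool) :
    quadratic_modes_matching_m m rl q retro =
      (PySem.List.pyRange 0 (PySem.List.len (PySem.List.sorted2 rl (fun x => x.1) (fun x => x.2) false)) 1).foldl
        (qmAstep (PySem.List.sorted2 rl (fun x => x.1) (fun x => x.2) false) (if retro then -1 else 1) m q) [] := rfl

lemma qm_B_eq (m : Int) (rl : List (Int × Int)) (q : Int) (retro : Bool) :
    quadratic_modes_matching_m_alt m rl q retro =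
      ((PySem.List.enumerate (PySem.List.sorted2 rl (fun x => x.1) (fun x => x.2) false)).foldl
        (qmBstep (PySem.List.sorted2 rl (fun x => x.1) (fun x => x.2) false) (if retro then -1 else 1) m q)
        (PySem.Dict.empty, [])).2 := rfl

lemma qm_sorted_two (x y : List Int) :
    PySem.List.sorted [x, y] (fun a => a) false = if y < x then [y, x] else [x, y] := by
  simp [PySem.List.sorted_eq_foldl_insertBy, PySem.List.insertBy]

lemma qmEntry_diag (rf l1 m1 n2 n1 : Int) (h : n2 ≤ n1) :
    qmEntry rf l1 m1 n2 l1 m1 n1 = [[rf * l1, m1, n2], [rf * l1, m1, n1]] := by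
  unfold qmEntry
  rw [qm_sorted_two]
  rw [if_neg]
  simp [List.cons_lt_cons_iff]
  omega

lemma qm_foldl_id {α β : Type} (l : List α) (acc : β) : l.foldl (fun a _ => a) acc = acc := by
  induction l generalizing acc <;> simp [*]

-- the double overtone loop for an off-diagonal pair (i ≠ j)
lemma qm_pair_off (lm : List (Int × Int)) (rf m q i j : Int) (h : i ≠ j)
    (acc : List (List (List Int))) :
    ((PySem.List.pyRange 0 (q + 1) 1).foldl (fun acc n1 =>
       (PySem.List.pyRange 0 ((if i = j then n1 else q) + 1) 1).foldl (fun acc n2 =>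
         if (PySem.List.pyGetD lm i ((0:Int),(0:Int))).2 + (PySem.List.pyGetD lm j ((0:Int),(0:Int))).2 = m then
           acc ++ [PySem.List.sorted [[rf * (PySem.List.pyGetD lm j ((0:Int),(0:Int))).1, (PySem.List.pyGetD lm j ((0:Int),(0:Int))).2, n2], [rf * (PySem.List.pyGetD lm i ((0:Int),(0:Int))).1, (PySem.List.pyGetD lm i ((0:Int),(0:Int))).2, n1]] (fun x => x) false]
         else acc) acc) acc)
    = acc ++ (if (PySem.List.pyGetD lm i ((0:Int),(0:Int))).2 + (PySem.List.pyGetD lm j ((0:Int),(0:Int))).2 = m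
        then qmBlockO rf q (PySem.List.pyGetD lm i ((0:Int),(0:Int))).1 (PySem.List.pyGetD lm i ((0:Int),(0:Int))).2
               (PySem.List.pyGetD lm j ((0:Int),(0:Int))).1 (PySem.List.pyGetD lm j ((0:Int),(0:Int))).2
        else []) := by
  set p1 := PySem.List.pyGetD lm i ((0 : Int), (0 : Int))
  set p2 := PySem.List.pyGetD lm j ((0 : Int), (0 : Int))
  by_cases hc : p1.2 + p2.2 = m
  · simp only [hc, if_pos, if_neg h]
    rw [PySem.List.foldl_congr_mem _ _
        (fun acc n1 => acc ++ (PySem.List.pyRange 0 (q + 1) 1).map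
          (fun n2 => qmEntry rf p2.1 p2.2 n2 p1.1 p1.2 n1)) acc ?_]
    · rw [PySem.List.foldl_append_eq_flatMap]
      rfl
    · intro acc' n1 _
      rw [PySem.List.foldl_append_singleton_eq_map]
      rfl
  · simp only [hc, ite_false, qm_foldl_id]
    simp

-- the double overtone loop on the diagonal (j = i): triangular, entries already ordered
lemma qm_pair_diag (lm : List (Int × Int)) (rf m q i : Int) (acc : List (List (List Int))) :
    ((PySem.List.pyRange 0 (q + 1) 1).foldl (fun acc n1 =>
       (PySem.List.pyRange 0 (n1 + 1) 1).foldl (fun acc n2 =>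
         if (PySem.List.pyGetD lm i ((0:Int),(0:Int))).2 + (PySem.List.pyGetD lm i ((0:Int),(0:Int))).2 = m then
           acc ++ [PySem.List.sorted [[rf * (PySem.List.pyGetD lm i ((0:Int),(0:Int))).1, (PySem.List.pyGetD lm i ((0:Int),(0:Int))).2, n2], [rf * (PySem.List.pyGetD lm i ((0:Int),(0:Int))).1, (PySem.List.pyGetD lm i ((0:Int),(0:Int))).2, n1]] (fun x => x) false]
         else acc) acc) acc)
    = acc ++ (if 2 * (PySem.List.pyGetD lm i ((0:Int),(0:Int))).2 = m
        then qmBlockD rf q (PySem.List.pyGetD lm i ((0:Int),(0:Int))).1 (PySem.List.pyGetD lm i ((0:Int),(0:Int))).2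
        else []) := by
  set p1 := PySem.List.pyGetD lm i ((0 : Int), (0 : Int))
  by_cases hc : 2 * p1.2 = m
  · have hc' : p1.2 + p1.2 = m := by omega
    simp only [hc, hc', if_pos]
    rw [PySem.List.foldl_congr_mem _ _
        (fun acc n1 => acc ++ (PySem.List.pyRange 0 (n1 + 1) 1).map
          (fun n2 => [[rf * p1.1, p1.2, n2], [rf * p1.1, p1.2, n1]])) acc ?_]
    · rw [PySem.List.foldl_append_eq_flatMap]
      rfl
    · intro acc' n1 _
      rw [PySem.List.foldl_append_singleton_eq_map]
      congr 1
      apply List.map_congr_left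
      intro n2 hn2
      have hle : n2 ≤ n1 := by
        have := (PySem.List.mem_pyRange_one.mp hn2).2
        omega
      exact qmEntry_diag rf p1.1 p1.2 n2 n1 hle
  · have hc' : ¬ (p1.2 + p1.2 = m) := by omega
    simp only [hc, hc', ite_false, qm_foldl_id]
    simp

-- A's per-i step, split into the strict prefix and the diagonal
lemma qm_A_step (lm : List (Int × Int)) (rf m q i : Int) (hi : 0 ≤ i) (acc : List (List (List Int))) :
    qmAstep lm rf m q acc i
    = acc ++ (PySem.List.pyRange 0 i 1).flatMap (fun j =>
        if (PySem.List.pyGetD lm i ((0:Int),(0:Int))).2 + (PySem.List.pyGetD lm j ((0:Int),(0:Int))).2 = m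
        then qmBlockO rf q (PySem.List.pyGetD lm i ((0:Int),(0:Int))).1 (PySem.List.pyGetD lm i ((0:Int),(0:Int))).2
               (PySem.List.pyGetD lm j ((0:Int),(0:Int))).1 (PySem.List.pyGetD lm j ((0:Int),(0:Int))).2
        else [])
      ++ (if 2 * (PySem.List.pyGetD lm i ((0:Int),(0:Int))).2 = m
        then qmBlockD rf q (PySem.List.pyGetD lm i ((0:Int),(0:Int))).1 (PySem.List.pyGetD lm i ((0:Int),(0:Int))).2
        else []) := by
  unfold qmAstep
  simp only []
  rw [PySem.List.pyRange_one_succ_right hi, List.foldl_append]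
  simp only [List.foldl_cons, List.foldl_nil, if_true]
  rw [qm_pair_diag lm rf m q i]
  rw [PySem.List.foldl_congr_mem (PySem.List.pyRange 0 i 1) _ (fun acc j =>
      acc ++ (if (PySem.List.pyGetD lm i ((0:Int),(0:Int))).2 + (PySem.List.pyGetD lm j ((0:Int),(0:Int))).2 = m
        then qmBlockO rf q (PySem.List.pyGetD lm i ((0:Int),(0:Int))).1 (PySem.List.pyGetD lm i ((0:Int),(0:Int))).2
               (PySem.List.pyGetD lm j ((0:Int),(0:Int))).1 (PySem.List.pyGetD lm j ((0:Int),(0:Int))).2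
        else [])) acc ?_]
  · rw [PySem.List.foldl_append_eq_flatMap]
  · intro acc' j hj
    have hji : j < i := (PySem.List.mem_pyRange_one.mp hj).2
    exact qm_pair_off lm rf m q i j (by omega) acc'

-- B's per-element step in closed form
lemma qm_B_step (lm : List (Int × Int)) (rf m q i : Int) (idx : PySem.Dict Int (List Int))
    (acc : List (List (List Int))) :
    qmBstep lm rf m q (idx, acc) (i, PySem.List.pyGetD lm i ((0:Int),(0:Int)))
    = (PySem.Dict.insert idx (PySem.List.pyGetD lm i ((0:Int),(0:Int))).2
        (PySem.Dict.getD idx (PySem.List.pyGetD lm i ((0:Int),(0:Int))).2 [] ++ [i]),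
       acc ++ (PySem.Dict.getD idx (m - (PySem.List.pyGetD lm i ((0:Int),(0:Int))).2) []).flatMap (fun j =>
           qmBlockO rf q (PySem.List.pyGetD lm i ((0:Int),(0:Int))).1 (PySem.List.pyGetD lm i ((0:Int),(0:Int))).2
             (PySem.List.pyGetD lm j ((0:Int),(0:Int))).1 (PySem.List.pyGetD lm j ((0:Int),(0:Int))).2)
         ++ (if 2 * (PySem.List.pyGetD lm i ((0:Int),(0:Int))).2 = m
           then qmBlockD rf q (PySem.List.pyGetD lm i ((0:Int),(0:Int))).1 (PySem.List.pyGetD lm i ((0:Int),(0:Int))).2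
           else [])) := by
  set p1 := PySem.List.pyGetD lm i ((0 : Int), (0 : Int))
  unfold qmBstep
  simp only []
  have hoff : ∀ (acc0 : List (List (List Int))),
      (PySem.Dict.getD idx (m - p1.2) []).foldl (fun out j =>
        let p2 := PySem.List.pyGetD lm j ((0 : Int), (0 : Int))
        (PySem.List.pyRange 0 (q + 1) 1).foldl (fun out n1 =>
          (PySem.List.pyRange 0 (q + 1) 1).foldl (fun out n2 =>
            out ++ [PySem.List.sorted [[rf * p2.1, p2.2, n2], [rf * p1.1, p1.2, n1]] (fun x => x) false]) out) out) acc0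
      = acc0 ++ (PySem.Dict.getD idx (m - p1.2) []).flatMap (fun j =>
          qmBlockO rf q p1.1 p1.2 (PySem.List.pyGetD lm j ((0:Int),(0:Int))).1 (PySem.List.pyGetD lm j ((0:Int),(0:Int))).2) := by
    intro acc0
    rw [PySem.List.foldl_congr_mem _ _
        (fun out j => out ++ qmBlockO rf q p1.1 p1.2
          (PySem.List.pyGetD lm j ((0:Int),(0:Int))).1 (PySem.List.pyGetD lm j ((0:Int),(0:Int))).2) acc0 ?_]
    · rw [PySem.List.foldl_append_eq_flatMap]
    · intro out j _
      simp only []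
      rw [PySem.List.foldl_congr_mem _ _
          (fun out n1 => out ++ (PySem.List.pyRange 0 (q + 1) 1).map
            (fun n2 => qmEntry rf (PySem.List.pyGetD lm j ((0:Int),(0:Int))).1
              (PySem.List.pyGetD lm j ((0:Int),(0:Int))).2 n2 p1.1 p1.2 n1)) out ?_]
      · rw [PySem.List.foldl_append_eq_flatMap]
        rfl
      · intro out' n1 _
        rw [PySem.List.foldl_append_singleton_eq_map]
        rfl
  by_cases hc : 2 * p1.2 = m
  · simp only [hc, if_pos, hoff]
    rw [PySem.List.foldl_congr_mem _ _
        (fun out n1 => out ++ (PySem.List.pyRange 0 (n1 + 1) 1).map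
          (fun n2 => [[rf * p1.1, p1.2, n2], [rf * p1.1, p1.2, n1]])) _ ?_]
    · rw [PySem.List.foldl_append_eq_flatMap]
      rfl
    · intro out n1 _
      rw [PySem.List.foldl_append_singleton_eq_map]
  · simp only [hc, ite_false, hoff]
    simp

lemma qm_flatMap_filter {α β : Type} (p : α → Bool) (g : α → List β) (l : List α) :
    (l.filter p).flatMap g = l.flatMap (fun x => if p x then g x else []) := by
  induction l with
  | nil => simp
  | cons x xs ih =>
    by_cases hx : p x <;> simp [hx, ih]

-- the membership predicate (index j of lm has azimuthal number k)
def qmPk (lm : List (Int × Int)) (k : Int) : Int → Bool :=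
  fun j => decide ((PySem.List.pyGetD lm j ((0:Int),(0:Int))).2 = k)

-- main induction: after processing indices 0..n-1, B's output equals A's output and
-- B's dict maps each k to exactly the processed indices whose azimuthal number is k
lemma qm_main (lm : List (Int × Int)) (rf m q : Int) (n : Nat) :
    ((PySem.List.pyRange 0 (n : Int) 1).foldl
        (fun st j => qmBstep lm rf m q st (j, PySem.List.pyGetD lm j ((0:Int),(0:Int))))
        (PySem.Dict.empty, [])).2
      = (PySem.List.pyRange 0 (n : Int) 1).foldl (qmAstep lm rf m q) []
    ∧ ∀ k : Int, PySem.Dict.getD ((PySem.List.pyRange 0 (n : Int) 1).foldl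
        (fun st j => qmBstep lm rf m q st (j, PySem.List.pyGetD lm j ((0:Int),(0:Int))))
        (PySem.Dict.empty, [])).1 k []
      = (PySem.List.pyRange 0 (n : Int) 1).filter (qmPk lm k) := by
  induction n with
  | zero =>
    simp [PySem.List.pyRange_one_eq_nil (le_refl (0:Int)), PySem.Dict.getD_empty]
  | succ n ih =>
    obtain ⟨ihout, ihdict⟩ := ih
    have hsplit : PySem.List.pyRange 0 ((n + 1 : Nat) : Int) 1
        = PySem.List.pyRange 0 (n : Int) 1 ++ [(n : Int)] := by
      push_cast
      exact PySem.List.pyRange_one_succ_right (by positivity)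
    rw [hsplit]
    simp only [List.foldl_append, List.foldl_cons, List.foldl_nil, List.filter_append]
    set stB := (PySem.List.pyRange 0 (n : Int) 1).foldl
        (fun st j => qmBstep lm rf m q st (j, PySem.List.pyGetD lm j ((0:Int),(0:Int))))
        (PySem.Dict.empty, []) with hstB
    have hstpair : stB = (stB.1, stB.2) := rfl
    rw [hstpair, qm_B_step]
    set p1 := PySem.List.pyGetD lm (n : Int) ((0 : Int), (0 : Int))
    constructor
    · rw [qm_A_step lm rf m q (n : Int) (by positivity), ← ihout]
      simp only []
      congr 1
      congr 1
      rw [ihdict (m - p1.2), qm_flatMap_filter]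
      apply List.flatMap_congr
      intro j _
      unfold qmPk
      by_cases hj : (PySem.List.pyGetD lm j ((0:Int),(0:Int))).2 = m - p1.2
      · rw [if_pos (show (decide ((PySem.List.pyGetD lm j ((0:Int),(0:Int))).2 = m - p1.2)) = true by
            simp [hj]),
          if_pos (show p1.2 + (PySem.List.pyGetD lm j ((0:Int),(0:Int))).2 = m by omega)]
      · rw [if_neg (show ¬ ((decide ((PySem.List.pyGetD lm j ((0:Int),(0:Int))).2 = m - p1.2)) = true) by
            simp [hj]),
          if_neg (show ¬ (p1.2 + (PySem.List.pyGetD lm j ((0:Int),(0:Int))).2 = m) by omega)]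
    · intro k
      simp only []
      rw [PySem.Dict.getD_insert, ihdict k]
      have hp : PySem.List.pyGetD lm ((n : Nat) : Int) ((0 : Int), (0 : Int)) = p1 := rfl
      by_cases hk : k = p1.2
      · subst hk
        rw [if_pos rfl, ihdict]
        have hfk : qmPk lm p1.2 ((n : Nat) : Int) = true := by
          unfold qmPk
          rw [hp]
          simp
        simp [hfk]
      · rw [if_neg hk]
        have hfk : qmPk lm k ((n : Nat) : Int) = false := by
          unfold qmPk
          rw [hp]
          simp
          omega
        simp [hfk]

-- ===== VERDICT (by name: the statement is the Claim_ definition above) =====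
theorem quadratic_modes_matching_m_spec : Claim_equal_quadratic_modes_matching_m := by
  intro m rl q retro _
  unfold Spec_quadratic_modes_matching_m
  rw [qm_A_eq, qm_B_eq]
  set lm := PySem.List.sorted2 rl (fun x => x.1) (fun x => x.2) false
  set rf : Int := if retro then -1 else 1
  rw [PySem.List.enumerate_eq_map_pyRange lm ((0:Int),(0:Int)), List.foldl_map]
  have hlen : PySem.List.len lm = ((lm.length : Nat) : Int) := by simp
  rw [hlen]
  exact ((qm_main lm rf m q lm.length).1).symm
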